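-- pv_equiv track=rewrite | github.com/kangbyounggwan/factor_ai_server | gcode_analyzer/troubleshoot/brave_image_searcher.py | _optimize_for_image_search
-- ===== SOURCE A (Python) =====
-- def _optimize_for_image_search(query: str) -> str:
--     """쿼리를 이미지 검색에 최적화"""
--     # 너무 긴 쿼리 줄이기
--     words = query.split()
--     if len(words) > 12:
--         # 핵심 키워드만 추출
--         keywords = []
--         important_terms = [
--             "3d", "print", "stringing", "warping", "adhesion", "layer",
--             "extrusion", "ghosting", "banding", "clogging", "blob",
--             "bridging", "overhang", "surface", "quality", "problem",
--             "rough", "gap", "shift", "curl", "lift"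
--         ]
--         for word in words:
--             if word.lower() in important_terms or len(keywords) < 8:
--                 keywords.append(word)
--         query = " ".join(keywords[:10])
--
--     # "example" 또는 "photo" 추가하여 실제 사례 이미지 검색
--     if "example" not in query.lower() and "photo" not in query.lower():
--         query += " example"
--
--     return query
-- ===== SOURCE B (Python) =====
-- def _optimize_for_image_search(query: str) -> str:
--     """Query optimizer for image search.
--
--     Key observation: when the query is long (> 12 words), A's loop necessarily
--     keeps the whole first 8 words, and the final [:10] cap means at most TWO
--     important words from the rest can survive.  So instead of accumulating and
--     slicing, keep words[:8] and do a bounded early-terminating scan of the tail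
--     that stops as soon as two important words have been found -- no cap slice,
--     no full filter of the tail.
--     """
--     words = query.split()
--     if len(words) > 12:
--         important_terms = {
--             "3d", "print", "stringing", "warping", "adhesion", "layer",
--             "extrusion", "ghosting", "banding", "clogging", "blob",
--             "bridging", "overhang", "surface", "quality", "problem",
--             "rough", "gap", "shift", "curl", "lift"
--         }
--         extras = []
--         for w in words[8:]:
--             if len(extras) == 2:
--                 break
--             if w.lower() in important_terms:
--                 extras.append(w)
--         query = " ".join(words[:8] + extras)
--     if "example" not in query.lower() and "photo" not in query.lower():
--         query += " example"
--     return query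
-- ===== Notes on version B (the rewrite author's own statement) =====
-- stated objective: alternative
-- what changed: Exploits that A's accumulator plus [:10] cap can only ever admit two important tail words after the mandatory first 8: B keeps words[:8] and runs a bounded early-terminating scan of words[8:] that stops after finding 2 important words, eliminating both the [:10] slice and the full tail filter.
import Mathlib
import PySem

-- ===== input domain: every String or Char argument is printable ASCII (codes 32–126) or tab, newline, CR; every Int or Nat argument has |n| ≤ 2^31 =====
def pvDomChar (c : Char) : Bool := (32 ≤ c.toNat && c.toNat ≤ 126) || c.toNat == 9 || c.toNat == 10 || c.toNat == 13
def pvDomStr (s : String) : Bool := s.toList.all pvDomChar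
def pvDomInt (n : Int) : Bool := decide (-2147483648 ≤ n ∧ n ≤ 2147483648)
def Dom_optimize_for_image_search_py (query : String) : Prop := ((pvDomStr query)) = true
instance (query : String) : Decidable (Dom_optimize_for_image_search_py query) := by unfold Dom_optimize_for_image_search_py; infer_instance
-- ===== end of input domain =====

-- B replaces A's accumulator loop + [:10] cap by words[:8] plus a bounded scan of the tail
-- that stops after two important words (objective: alternative decomposition, same cost class).

-- ===== PORT A =====
def pvImportantTerms : List String :=
  ["3d", "print", "stringing", "warping", "adhesion", "layer",
   "extrusion", "ghosting", "banding", "clogging", "blob",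
   "bridging", "overhang", "surface", "quality", "problem",
   "rough", "gap", "shift", "curl", "lift"]

def optimize_for_image_search_py (query : String) : String :=
  let words := PySem.Str.split₀ query
  let query1 :=
    if words.length > 12 then
      let keywords := words.foldl
        (fun kw w =>
          if pvImportantTerms.contains (PySem.Str.lower w) || decide (kw.length < 8)
          then kw ++ [w] else kw) []
      PySem.Str.join " " (PySem.List.slice keywords none (some 10))
    else query
  if !PySem.Str.isIn "example" (PySem.Str.lower query1)
     && !PySem.Str.isIn "photo" (PySem.Str.lower query1)
  then query1 ++ " example" else query1

-- ===== PORT B =====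
def pvImportantSet : PySem.Set String := PySem.Set.ofList pvImportantTerms

-- the bounded tail scan: stop when the budget (2 minus extras found) hits 0
def pvPickExtras : List String → Nat → List String
  | _, 0 => []
  | [], _ + 1 => []
  | w :: ws, n + 1 =>
      if PySem.Set.contains pvImportantSet (PySem.Str.lower w)
      then w :: pvPickExtras ws n
      else pvPickExtras ws (n + 1)

def optimize_for_image_search_py_alt (query : String) : String :=
  let words := PySem.Str.split₀ query
  let query1 :=
    if words.length > 12 then
      PySem.Str.join " " (words.take 8 ++ pvPickExtras (words.drop 8) 2)
    else query
  if !PySem.Str.isIn "example" (PySem.Str.lower query1)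
     && !PySem.Str.isIn "photo" (PySem.Str.lower query1)
  then query1 ++ " example" else query1

-- ===== PRECONDITION & SPEC =====
def Spec_optimize_for_image_search_py (query : String) (out : String) : Prop := out = optimize_for_image_search_py_alt query
instance (query : String) (out : String) : Decidable (Spec_optimize_for_image_search_py query out) := by unfold Spec_optimize_for_image_search_py; infer_instance

-- ===== CLAIM (what is proved, stated in full; the proofs are below) =====
def Claim_equal_optimize_for_image_search_py : Prop := ∀ (query : String), Dom_optimize_for_image_search_py query → Spec_optimize_for_image_search_py query (optimize_for_image_search_py query)

-- ===== LEMMAS AND PROOFS =====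

-- once 8 keywords are collected, A's loop keeps exactly the important words
theorem pvFoldl_of_full (ws : List String) (kw : List String) (h : 8 ≤ kw.length) :
    List.foldl
      (fun kw w =>
        if pvImportantTerms.contains (PySem.Str.lower w) || decide (kw.length < 8)
        then kw ++ [w] else kw) kw ws
    = kw ++ ws.filter (fun w => pvImportantTerms.contains (PySem.Str.lower w)) := by
  induction ws generalizing kw with
  | nil => simp
  | cons w ws ih =>
    have hlt : ¬ kw.length < 8 := by omega
    by_cases hp : pvImportantTerms.contains (PySem.Str.lower w) = true
    · simp only [List.foldl_cons, List.filter_cons, hp, hlt, decide_false, Bool.or_false,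
        if_true]
      rw [ih (kw ++ [w]) (by simp; omega)]
      simp only [List.append_assoc, List.singleton_append]
    · have hp' : pvImportantTerms.contains (PySem.Str.lower w) = false := by
        simpa using hp
      have hd : decide (kw.length < 8) = false := by simpa using hlt
      simp only [List.foldl_cons, List.filter_cons, hp', hd, Bool.or_self, Bool.false_eq_true,
        if_false]
      exact ih kw h

theorem pvFoldl_split (ws : List String) (kw : List String) (h : kw.length ≤ 8) :
    List.foldl
      (fun kw w =>
        if pvImportantTerms.contains (PySem.Str.lower w) || decide (kw.length < 8)
        then kw ++ [w] else kw) kw ws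
    = kw ++ ws.take (8 - kw.length)
        ++ (ws.drop (8 - kw.length)).filter (fun w => pvImportantTerms.contains (PySem.Str.lower w)) := by
  induction ws generalizing kw with
  | nil => simp
  | cons w ws ih =>
    by_cases hfull : kw.length = 8
    · have h0 : 8 - kw.length = 0 := by omega
      rw [h0]
      simp only [List.take_zero, List.drop_zero, List.append_nil]
      rw [pvFoldl_of_full (w :: ws) kw (by omega)]
    · have hlt : kw.length < 8 := by omega
      have hd : decide (kw.length < 8) = true := by simpa using hlt
      simp only [List.foldl_cons, hd, Bool.or_true, if_true]
      rw [ih (kw ++ [w]) (by simp; omega)]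
      have h8 : 8 - kw.length = (8 - (kw ++ [w]).length) + 1 := by simp; omega
      rw [h8]
      simp [List.take_succ_cons, List.drop_succ_cons]

-- the bounded scan is the first-n prefix of the filtered tail
theorem pvPickExtras_eq_take_filter (ws : List String) (n : Nat) :
    pvPickExtras ws n
      = (ws.filter (fun w => pvImportantTerms.contains (PySem.Str.lower w))).take n := by
  induction ws generalizing n with
  | nil => cases n <;> simp [pvPickExtras]
  | cons w ws ih =>
    cases n with
    | zero => simp [pvPickExtras]
    | succ n =>
      by_cases hp : PySem.Str.lower w ∈ pvImportantTerms
      · simp [pvPickExtras, ih, pvImportantSet, PySem.Set.mem_ofList, hp]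
      · simp [pvPickExtras, ih, pvImportantSet, PySem.Set.mem_ofList, hp]

-- A's sliced keyword list equals B's two-part list (for ≥ 8 words)
theorem pvKeywords_eq (ws : List String) (h : 8 ≤ ws.length) :
    PySem.List.slice
      (List.foldl
        (fun kw w =>
          if pvImportantTerms.contains (PySem.Str.lower w) || decide (kw.length < 8)
          then kw ++ [w] else kw) [] ws) none (some 10)
    = ws.take 8 ++ pvPickExtras (ws.drop 8) 2 := by
  rw [pvFoldl_split ws [] (by simp)]
  have h10 : ((10 : Nat) : Int) = (10 : Int) := by norm_num
  rw [← h10, PySem.List.slice_to_natCast]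
  have hlen : (ws.take 8).length = 8 := by simp [List.length_take]; omega
  rw [pvPickExtras_eq_take_filter]
  simp only [List.nil_append, List.length_nil, Nat.sub_zero]
  rw [List.take_append, hlen]
  simp [List.take_take]

-- ===== VERDICT (by name: the statement is the Claim_ definition above) =====
theorem optimize_for_image_search_py_spec : Claim_equal_optimize_for_image_search_py := by
  intro query _
  unfold Spec_optimize_for_image_search_py optimize_for_image_search_py optimize_for_image_search_py_alt
  by_cases h : (PySem.Str.split₀ query).length > 12
  · simp only [h, if_true, pvKeywords_eq (PySem.Str.split₀ query) (by omega)]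
  · simp only [h, if_false]
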